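-- pv_equiv track=rewrite | github.com/rkchen02/Coursework | MachineLearning/tick6.py | get_agreement_table
-- ===== SOURCE A (Python) =====
-- from typing import List, Dict, Union
--
-- def get_agreement_table(review_predictions: List[Dict[int, int]]) -> Dict[int, Dict[int,int]]:
--     """
--     Builds an agreement table from the student predictions.
--
--     @param review_predictions: a list of predictions for each student, the predictions are encoded as dictionaries, with the key being the review id and the value the predicted sentiment
--     @return: an agreement table, which for each review contains the number of predictions that predicted each sentiment.
--     """
--     agreement_table = {}
--
--     # Count the number of predictions that predicted each sentiment for each review
--     for student in review_predictions:
--         for review, sentiment in student.items():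
--             if review not in agreement_table:
--                 agreement_table[review] = {1: 0, -1: 0, 0: 0}
--             agreement_table[review][sentiment] += 1
--
--     return agreement_table
-- ===== SOURCE B (Python) =====
-- def get_agreement_table(review_predictions):
--     # Pass 1: flatten and group predicted sentiments per review (first-seen review order).
--     pairs = [(review, sentiment)
--              for student in review_predictions
--              for review, sentiment in student.items()]
--     sentiments_by_review = {}
--     for review, sentiment in pairs:
--         sentiments_by_review.setdefault(review, []).append(sentiment)
--     # Pass 2: tally each review's sentiment list into a fixed-key table.
--     agreement_table = {}
--     for review, sentiments in sentiments_by_review.items():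
--         counts = {1: 0, -1: 0, 0: 0}
--         for s in sentiments:
--             counts[s] += 1
--         agreement_table[review] = counts
--     return agreement_table
-- ===== Notes on version B (the rewrite author's own statement) =====
-- stated objective: alternative
-- what changed: A tallies in one pass into a nested dict-of-counters; B first flattens all (review, sentiment) pairs and groups sentiments per review into lists, then tallies each group in a separate counting pass.
import Mathlib
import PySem

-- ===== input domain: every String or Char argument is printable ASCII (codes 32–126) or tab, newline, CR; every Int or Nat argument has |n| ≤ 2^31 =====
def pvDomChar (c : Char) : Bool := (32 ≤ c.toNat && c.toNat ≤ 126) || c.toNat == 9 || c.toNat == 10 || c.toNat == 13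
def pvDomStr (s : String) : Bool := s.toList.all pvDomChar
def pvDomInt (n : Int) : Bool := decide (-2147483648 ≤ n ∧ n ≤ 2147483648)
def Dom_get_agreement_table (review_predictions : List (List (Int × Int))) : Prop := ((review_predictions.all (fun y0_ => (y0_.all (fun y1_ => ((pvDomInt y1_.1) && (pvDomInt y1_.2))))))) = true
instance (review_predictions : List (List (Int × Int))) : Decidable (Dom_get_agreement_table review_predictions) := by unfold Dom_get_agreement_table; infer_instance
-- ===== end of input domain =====

-- B groups sentiments per review (flatten + group-by-review, then a separate counting pass)
-- instead of A's single-pass nested dict-of-counters; same cost, different decomposition.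

-- ===== PORT A =====
-- the literal {1: 0, -1: 0, 0: 0}
def pvInitTable : PySem.Dict Int Int := PySem.Dict.ofList [(1, 0), (-1, 0), (0, 0)]

-- loop body of A's inner loop: 'if review not in agreement_table: …; agreement_table[review][sentiment] += 1'
-- (on the inner dict, Python's '[sentiment] += 1' raises KeyError when sentiment ∉ {1,-1,0};
--  those inputs are excluded by Pre_, so 'modify' with default 0 agrees wherever Python returns)
def pvStepA (acc : PySem.Dict Int (PySem.Dict Int Int)) (p : Int × Int) :
    PySem.Dict Int (PySem.Dict Int Int) :=
  let acc := if acc.contains p.1 then acc else acc.insert p.1 pvInitTable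
  acc.modify p.1 PySem.Dict.empty (fun inner => inner.modify p.2 0 (· + 1))

def get_agreement_table (review_predictions : List (List (Int × Int))) :
    List (Int × List (Int × Int)) :=
  let agreement_table :=
    review_predictions.foldl (fun acc student => student.foldl pvStepA acc) PySem.Dict.empty
  agreement_table.items.map (fun q => (q.1, q.2.items))

-- ===== PORT B =====
-- 'counts = {1:0,-1:0,0:0}; for s in sentiments: counts[s] += 1'  (same KeyError remark as above)
def pvCountSentiments (l : List Int) : PySem.Dict Int Int :=
  l.foldl (fun counts s => counts.modify s 0 (· + 1)) pvInitTable

-- 'sentiments_by_review.setdefault(review, []).append(sentiment)'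
def pvStepB (d : PySem.Dict Int (List Int)) (p : Int × Int) : PySem.Dict Int (List Int) :=
  d.modify p.1 [] (· ++ [p.2])

def get_agreement_table_alt (review_predictions : List (List (Int × Int))) :
    List (Int × List (Int × Int)) :=
  let pairs := review_predictions.flatMap (fun student => student)
  let sentiments_by_review := pairs.foldl pvStepB PySem.Dict.empty
  sentiments_by_review.items.map (fun q => (q.1, (pvCountSentiments q.2).items))

-- ===== PRECONDITION & SPEC =====
-- Pre_ excludes (a) any predicted sentiment outside {1,-1,0}, on which the Python A raises KeyError,
-- and (b) assoc lists with duplicate review ids inside one student, which do not encode a Python dict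
-- (no Python input corresponds to them, so nothing A returns on is excluded by (b)).
def Pre_get_agreement_table (review_predictions : List (List (Int × Int))) : Prop :=
  ∀ student ∈ review_predictions,
    (student.map (·.1)).Nodup ∧ ∀ p ∈ student, p.2 = 1 ∨ p.2 = -1 ∨ p.2 = 0
instance (review_predictions : List (List (Int × Int))) : Decidable (Pre_get_agreement_table review_predictions) := by unfold Pre_get_agreement_table; infer_instance

def pvWitness_get_agreement_table : (List (List (Int × Int))) := ([[(5, 1), (6, -1)], [(5, 0)]])

def Spec_get_agreement_table (review_predictions : List (List (Int × Int))) (out : List (Int × List (Int × Int))) : Prop := out = get_agreement_table_alt review_predictions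
instance (review_predictions : List (List (Int × Int))) (out : List (Int × List (Int × Int))) : Decidable (Spec_get_agreement_table review_predictions out) := by unfold Spec_get_agreement_table; infer_instance

-- ===== CLAIM (what is proved, stated in full; the proofs are below) =====
def Claim_equal_get_agreement_table : Prop := ∀ (review_predictions : List (List (Int × Int))), Dom_get_agreement_table review_predictions → Pre_get_agreement_table review_predictions → Spec_get_agreement_table review_predictions (get_agreement_table review_predictions)

-- ===== LEMMAS AND PROOFS =====

-- the value-wise image: each per-review sentiment list tallied into its counting table
def pvG (q : Int × List Int) : Int × PySem.Dict Int Int := (q.1, pvCountSentiments q.2)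
def pvPhi (d : PySem.Dict Int (List Int)) : PySem.Dict Int (PySem.Dict Int Int) :=
  PySem.Dict.mk (d.items.map pvG)

lemma pvCount_snoc (l : List Int) (s : Int) :
    pvCountSentiments (l ++ [s]) = (pvCountSentiments l).modify s 0 (· + 1) := by
  simp [pvCountSentiments, List.foldl_append]

lemma pvPhi_contains (d : PySem.Dict Int (List Int)) (k : Int) :
    (pvPhi d).contains k = d.contains k := by
  simp [pvPhi, PySem.Dict.contains, List.any_map, Function.comp_def, pvG]

lemma pvStep_comm (d : PySem.Dict Int (List Int)) (p : Int × Int) :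
    pvStepA (pvPhi d) p = pvPhi (pvStepB d p) := by
  rcases p with ⟨r, s⟩
  unfold pvStepA pvStepB
  simp only [pvPhi_contains]
  by_cases h : d.contains r = true
  · have hh : d.items.any (fun q => q.1 == r) = true := h
    obtain ⟨q0, hq0⟩ : ∃ q0, d.items.find? (fun q => q.1 == r) = some q0 := by
      rw [← Option.isSome_iff_exists, List.find?_isSome]
      simpa using hh
    have hget : d.get? r = some q0.2 := by
      simp [PySem.Dict.get?, hq0]
    have hgetphi : (pvPhi d).get? r = some (pvCountSentiments q0.2) := by
      have hfun : ((fun p : Int × PySem.Dict Int Int => p.1 == r) ∘ pvG) = (fun q : Int × List Int => q.1 == r) := by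
        funext q; simp [pvG]
      simp [pvPhi, PySem.Dict.get?, List.find?_map, hfun, hq0, pvG]
    simp only [if_pos h]
    unfold PySem.Dict.modify
    rw [PySem.Dict.getD, PySem.Dict.getD, hget, hgetphi]
    simp only [Option.getD_some]
    have hsnoc : pvCountSentiments (q0.2 ++ [s])
        = (pvCountSentiments q0.2).insert s ((pvCountSentiments q0.2).getD s 0 + 1) := by
      rw [pvCount_snoc]; rfl
    rw [← hsnoc]
    -- now: (pvPhi d).insert r (cnt (q0.2++[s])) = pvPhi (d.insert r (q0.2++[s]))
    unfold PySem.Dict.insert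
    rw [pvPhi_contains, if_pos h, if_pos h]
    unfold pvPhi
    simp only [List.map_map]
    congr 1
    apply List.map_congr_left
    intro a _
    by_cases ha : a.1 = r
    · simp [pvG, ha]
    · simp [pvG, ha]
  · have hh : d.items.any (fun q => q.1 == r) = false := by
      simp only [PySem.Dict.contains] at h; exact Bool.eq_false_iff.mpr h
    rw [List.any_eq_false] at hh
    have hfind : d.items.find? (fun q => q.1 == r) = none :=
      List.find?_eq_none.mpr hh
    have hget : d.get? r = none := by simp [PySem.Dict.get?, hfind]
    simp only [if_neg h]
    unfold PySem.Dict.modify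
    rw [PySem.Dict.getD, PySem.Dict.getD, hget]
    unfold PySem.Dict.insert
    rw [pvPhi_contains, if_neg h, if_neg h]
    have hgetins : (PySem.Dict.mk ((pvPhi d).items ++ [(r, pvInitTable)])).get? r = some pvInitTable := by
      simp [PySem.Dict.get?, List.find?_append]
      rw [show ((pvPhi d).items.find? (fun q => q.1 == r)) = none from ?_]
      · rfl
      · rw [List.find?_eq_none]
        intro x hx
        simp only [pvPhi, List.mem_map] at hx
        obtain ⟨a, ha, rfl⟩ := hx
        have := hh a ha; simpa [pvG] using this
    rw [hgetins]
    simp only [Option.getD_some, Option.getD_none]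
    have hcont : (PySem.Dict.mk ((pvPhi d).items ++ [(r, pvInitTable)])).contains r = true := by
      simp [PySem.Dict.contains]
    rw [if_pos hcont]
    unfold pvPhi
    simp only [List.map_append, List.map_map]
    congr 1
    congr 1
    · apply List.map_congr_left
      intro a ha
      have hfa : ¬ (a.1 = r) := by
        have := hh a ha; simpa using this
      simp [pvG, hfa]
    · simp [pvG, pvCountSentiments, PySem.Dict.modify, List.foldl, PySem.Dict.insert]

lemma pvFold_comm (ps : List (Int × Int)) (d : PySem.Dict Int (List Int)) :
    ps.foldl pvStepA (pvPhi d) = pvPhi (ps.foldl pvStepB d) := by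
  induction ps generalizing d with
  | nil => rfl
  | cons p ps ih => simp [List.foldl_cons, pvStep_comm, ih]

lemma pvFold_flat (rp : List (List (Int × Int))) (acc : PySem.Dict Int (PySem.Dict Int Int)) :
    rp.foldl (fun acc student => student.foldl pvStepA acc) acc
      = (rp.flatMap (fun student => student)).foldl pvStepA acc := by
  induction rp generalizing acc with
  | nil => rfl
  | cons st rp ih => simp [List.flatMap_cons, List.foldl_append, ih]

-- ===== VERDICT (by name: the statement is the Claim_ definition above) =====
theorem get_agreement_table_spec : Claim_equal_get_agreement_table := by
  intro rp _ _
  show _ = _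
  rw [get_agreement_table, get_agreement_table_alt, pvFold_flat]
  have h : (PySem.Dict.empty : PySem.Dict Int (PySem.Dict Int Int)) = pvPhi PySem.Dict.empty := rfl
  rw [h, pvFold_comm]
  simp [pvPhi, pvG, List.map_map, Function.comp]
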